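-- pv_equiv track=rewrite | github.com/zainulisalm0001/Ethical_Chat_Guard_Project | EthicsBot.py | _latest_assistant_and_context
-- ===== SOURCE A (Python) =====
-- def _latest_assistant_and_context(messages: list[dict]):
--     """
--     Returns:
--       - last_assistant_idx (index in messages list)
--       - last_assistant_text
--       - last_user_text (nearest preceding user prompt)
--     """
--     last_assistant_idx = None
--     last_assistant_text = None
--     last_user_text = ""
--
--     for i in range(len(messages) - 1, -1, -1):
--         if messages[i].get("role") == "assistant":
--             last_assistant_idx = i
--             last_assistant_text = messages[i].get("content", "")
--             # find nearest user before it
--             for j in range(i - 1, -1, -1):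
--                 if messages[j].get("role") == "user":
--                     last_user_text = messages[j].get("content", "")
--                     break
--             break
--
--     return last_assistant_idx, last_assistant_text, last_user_text
-- ===== SOURCE B (Python) =====
-- def _latest_assistant_and_context(messages: list[dict]):
--     # One forward pass: track the most recent user content; each assistant
--     # message overwrites the candidate (index, text, preceding user text).
--     last_user = ""
--     candidate = None
--     for i, msg in enumerate(messages):
--         role = msg.get("role")
--         if role == "user":
--             last_user = msg.get("content", "")
--         elif role == "assistant":
--             candidate = (i, msg.get("content", ""), last_user)
--     if candidate is None:
--         return None, None, ""
--     return candidate[0], candidate[1], candidate[2]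
-- ===== Notes on version B (the rewrite author's own statement) =====
-- stated objective: alternative
-- what changed: Replaces A's backward scan for the last assistant plus a nested backward scan for the preceding user with a single forward pass that tracks the most recent user content and overwrites an assistant candidate.
import Mathlib
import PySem

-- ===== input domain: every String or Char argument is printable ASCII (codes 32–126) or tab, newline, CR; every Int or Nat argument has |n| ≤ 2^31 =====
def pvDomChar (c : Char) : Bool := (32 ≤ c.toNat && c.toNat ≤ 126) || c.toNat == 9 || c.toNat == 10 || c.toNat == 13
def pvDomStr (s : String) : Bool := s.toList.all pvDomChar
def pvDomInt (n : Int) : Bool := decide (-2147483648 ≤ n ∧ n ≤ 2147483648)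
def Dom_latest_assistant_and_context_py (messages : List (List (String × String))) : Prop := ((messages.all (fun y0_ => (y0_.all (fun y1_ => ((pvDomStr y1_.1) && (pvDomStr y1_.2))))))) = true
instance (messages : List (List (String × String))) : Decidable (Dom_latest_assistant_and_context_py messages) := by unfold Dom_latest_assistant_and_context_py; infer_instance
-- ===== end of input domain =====

-- B replaces A's backward scan + nested backward user-scan with one forward pass
-- tracking the most recent user content (objective: alternative decomposition).

-- ===== PORT A =====
-- shared dict primitive: first-match lookup on the association list (dict.get)
def pvDGet? (m : List (String × String)) (k : String) : Option String :=
  (PySem.Dict.mk m).get? k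

def pvDGetD (m : List (String × String)) (k : String) (d : String) : String :=
  ((PySem.Dict.mk m).get? k).getD d

-- inner loop of A: for j in range(i-1,-1,-1), stop at the first role=="user"
def pvInnerA (messages : List (List (String × String))) : Nat → String
  | 0 => ""
  | j + 1 =>
    let m := messages.getD j []
    if pvDGet? m "role" = some "user" then pvDGetD m "content" ""
    else pvInnerA messages j

-- outer loop of A: for i in range(len-1,-1,-1), stop at first role=="assistant"
def pvOuterA (messages : List (List (String × String))) :
    Nat → Option Int × Option String × String
  | 0 => (none, none, "")
  | i + 1 =>
    let m := messages.getD i []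
    if pvDGet? m "role" = some "assistant" then
      (some (i : Int), some (pvDGetD m "content" ""), pvInnerA messages i)
    else pvOuterA messages i

def latest_assistant_and_context_py (messages : List (List (String × String))) : Option Int × Option String × String :=
  pvOuterA messages messages.length

-- ===== PORT B =====
-- loop body of B's forward pass: state = (last_user, candidate)
def pvStepB (st : String × Option (Int × String × String))
    (p : Int × List (String × String)) : String × Option (Int × String × String) :=
  let role := pvDGet? p.2 "role"
  if role = some "user" then (pvDGetD p.2 "content" "", st.2)
  else if role = some "assistant" then (st.1, some (p.1, pvDGetD p.2 "content" "", st.1))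
  else st

def latest_assistant_and_context_py_alt (messages : List (List (String × String))) : Option Int × Option String × String :=
  let r := (PySem.List.enumerate messages 0).foldl pvStepB ("", none)
  match r.2 with
  | none => (none, none, "")
  | some (i, t, u) => (some i, some t, u)

-- ===== PRECONDITION & SPEC =====
def Spec_latest_assistant_and_context_py (messages : List (List (String × String))) (out : Option Int × Option String × String) : Prop := out = latest_assistant_and_context_py_alt messages
instance (messages : List (List (String × String))) (out : Option Int × Option String × String) : Decidable (Spec_latest_assistant_and_context_py messages out) := by unfold Spec_latest_assistant_and_context_py; infer_instance

-- ===== CLAIM (what is proved, stated in full; the proofs are below) =====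
def Claim_equal_latest_assistant_and_context_py : Prop := ∀ (messages : List (List (String × String))), Dom_latest_assistant_and_context_py messages → Spec_latest_assistant_and_context_py messages (latest_assistant_and_context_py messages)

-- ===== LEMMAS AND PROOFS =====

-- interpret B's final candidate as the returned triple
def pvFinishB (c : Option (Int × String × String)) : Option Int × Option String × String :=
  match c with
  | none => (none, none, "")
  | some (i, t, u) => (some i, some t, u)

theorem pvGetD_append_lt (ms : List (List (String × String))) (m : List (String × String))
    (j : Nat) (h : j < ms.length) : (ms ++ [m]).getD j [] = ms.getD j [] := by
  simp [List.getD, List.getElem?_append_left h]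

theorem pvInnerA_append (ms : List (List (String × String))) (m : List (String × String)) :
    ∀ j, j ≤ ms.length → pvInnerA (ms ++ [m]) j = pvInnerA ms j := by
  intro j
  induction j with
  | zero => intro _; rfl
  | succ k ih =>
    intro h
    have hk : k < ms.length := Nat.lt_of_succ_le h
    simp only [pvInnerA, pvGetD_append_lt ms m k hk, ih (Nat.le_of_lt hk)]

theorem pvOuterA_append (ms : List (List (String × String))) (m : List (String × String)) :
    ∀ i, i ≤ ms.length → pvOuterA (ms ++ [m]) i = pvOuterA ms i := by
  intro i
  induction i with
  | zero => intro _; rfl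
  | succ k ih =>
    intro h
    have hk : k < ms.length := Nat.lt_of_succ_le h
    simp only [pvOuterA, pvGetD_append_lt ms m k hk, ih (Nat.le_of_lt hk),
      pvInnerA_append ms m k (Nat.le_of_lt hk)]

-- main invariant of B's forward pass, by induction on the list from the back
theorem pvMain (ms : List (List (String × String))) :
    ((PySem.List.enumerate ms 0).foldl pvStepB ("", none)).1 = pvInnerA ms ms.length ∧
    pvFinishB ((PySem.List.enumerate ms 0).foldl pvStepB ("", none)).2 = pvOuterA ms ms.length := by
  induction ms using List.reverseRecOn with
  | nil => exact ⟨rfl, rfl⟩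
  | append_singleton ms m ih =>
    have henum : PySem.List.enumerate (ms ++ [m]) 0
        = PySem.List.enumerate ms 0 ++ [((ms.length : Int), m)] := by
      rw [PySem.List.enumerate_append]
      simp [PySem.List.enumerate]
    obtain ⟨ih1, ih2⟩ := ih
    rw [henum, List.foldl_append]
    simp only [List.foldl]
    have hlen : (ms ++ [m]).length = ms.length + 1 := by simp
    rw [hlen]
    by_cases hu : pvDGet? m "role" = some "user" <;>
      by_cases ha : pvDGet? m "role" = some "assistant" <;>
      constructor <;>
      simp_all [pvStepB, pvInnerA, pvOuterA, pvFinishB,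
        pvInnerA_append ms m ms.length le_rfl, pvOuterA_append ms m ms.length le_rfl]

-- ===== VERDICT (by name: the statement is the Claim_ definition above) =====
theorem latest_assistant_and_context_py_spec : Claim_equal_latest_assistant_and_context_py := by
  intro messages _
  unfold Spec_latest_assistant_and_context_py latest_assistant_and_context_py
    latest_assistant_and_context_py_alt
  rw [← (pvMain messages).2]
  rfl
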